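-- pv_equiv track=rewrite | github.com/szufix/outer-diversity | src/domain/fishburn.py | is_fishburn_domain
-- ===== SOURCE A (Python) =====
-- def is_fishburn_domain(domain):
--     """
--     Check whether a given domain (list of votes) satisfies Fishburn's
--     alternating triple rule used to construct the Fishburn domain.
--
--     The domain is a list (or iterable) of votes, where each vote is an
--     ordering of alternatives represented by integers/labels. We assume all
--     votes use the same set of alternatives. The rule checked is:
--
--       For every triple of distinct alternatives a < b < c (using the numeric
--       ordering of labels), if b is odd then b is never top among {a,b,c}
--       in any vote; if b is even then b is never bottom among {a,b,c} in any
--       vote.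
--
--     Returns True if the domain satisfies the rule, False otherwise.
--     """
--     # domain must be non-empty and votes must be sequences
--     domain = list(domain)
--     if len(domain) == 0:
--         return True  # empty domain trivially satisfies the condition
--
--     # infer alternatives from first vote
--     first = domain[0]
--     try:
--         alts = list(first)
--     except TypeError:
--         raise ValueError("Votes in domain must be sequences of alternatives")
--
--     # Map alternative labels to canonical numeric ordering for triple test.
--     # The fishburn construction in this module uses 0..m-1 ordering. We will
--     # sort the alternative labels by their natural ordering and use that
--     # ordering to determine triples a<b<c.
--     sorted_alts = sorted(alts)
--
--     # create index mapping for each vote and validate votes contain same alts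
--     m = len(sorted_alts)
--     expected_set = set(sorted_alts)
--
--     for v in domain:
--         if set(v) != expected_set:
--             raise ValueError("All votes in domain must contain the same set of alternatives")
--
--     # check each vote against the triple rule
--     for vote in domain:
--         pos = {a: i for i, a in enumerate(vote)}
--         # iterate over triples using sorted_alts
--         for i_idx in range(m - 2):
--             for j_idx in range(i_idx + 1, m - 1):
--                 for k_idx in range(j_idx + 1, m):
--                     i = sorted_alts[i_idx]
--                     j = sorted_alts[j_idx]
--                     k = sorted_alts[k_idx]
--
--                     pi, pj, pk = pos[i], pos[j], pos[k]
--
--                     # For parity, interpret alternatives as integers if possible.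
--                     # If labels are not integers, fall back to their position parity
--                     # in the sorted order (to mimic the module's 0..m-1 parity).
--                     try:
--                         j_label = int(j)
--                         parity = j_label % 2
--                     except Exception:
--                         parity = j_idx % 2
--
--                     if parity == 1:
--                         # j is odd: NEVER-TOP
--                         if pj < pi and pj < pk:
--                             return False
--                     else:
--                         # j is even: NEVER-BOTTOM
--                         if pj > pi and pj > pk:
--                             return False
--
--     return True
-- ===== SOURCE B (Python) =====
-- def is_fishburn_domain(domain):
--     """Fishburn alternating-triple check: per vote, per middle alternative j
--     (in sorted label order) test existence of a worse-placed alternative on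
--     each side, instead of enumerating all triples."""
--     domain = list(domain)
--     if not domain:
--         return True
--
--     sorted_alts = sorted(domain[0])
--     expected_set = set(sorted_alts)
--     for v in domain:
--         if set(v) != expected_set:
--             raise ValueError("All votes in domain must contain the same set of alternatives")
--
--     m = len(sorted_alts)
--     for vote in domain:
--         pos = {a: i for i, a in enumerate(vote)}
--         p = [pos[a] for a in sorted_alts]
--         for j in range(1, m - 1):
--             pj = p[j]
--             if sorted_alts[j] % 2 == 1:
--                 # odd middle: never top among any triple it is the middle of
--                 if any(p[i] > pj for i in range(j)) and any(p[k] > pj for k in range(j + 1, m)):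
--                     return False
--             else:
--                 # even middle: never bottom
--                 if any(p[i] < pj for i in range(j)) and any(p[k] < pj for k in range(j + 1, m)):
--                     return False
--     return True
-- ===== Notes on version B (the rewrite author's own statement) =====
-- stated objective: faster
-- what changed: B replaces A's enumeration of all sorted-label triples (i,j,k) per vote by a per-middle-index pass that checks existence of a worse/better-placed alternative on each side of the middle, using a precomputed position list.
import Mathlib
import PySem

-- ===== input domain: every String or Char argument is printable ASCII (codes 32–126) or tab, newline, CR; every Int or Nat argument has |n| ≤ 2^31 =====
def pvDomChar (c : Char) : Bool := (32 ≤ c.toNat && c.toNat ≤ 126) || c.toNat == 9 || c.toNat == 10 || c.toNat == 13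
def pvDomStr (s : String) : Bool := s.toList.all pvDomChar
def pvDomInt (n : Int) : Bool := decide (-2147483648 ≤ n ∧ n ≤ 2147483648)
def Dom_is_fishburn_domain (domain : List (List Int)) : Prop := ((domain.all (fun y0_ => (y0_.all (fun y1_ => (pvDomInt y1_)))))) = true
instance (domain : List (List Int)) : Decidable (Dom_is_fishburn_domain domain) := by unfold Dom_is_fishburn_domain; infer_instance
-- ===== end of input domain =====

-- B replaces A's O(n·m³) enumeration of all sorted-label triples by an O(n·m²) per-middle-label
-- existence test on each side (objective: faster, asymptotic in m).

-- ===== PORT A =====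
-- pos = {a: i for i, a in enumerate(vote)}  (identical line in A and B; duplicates overwrite)
def fishPos (vote : List Int) : PySem.Dict Int Int :=
  (PySem.List.enumerate vote 0).foldl (fun d ia => d.insert ia.2 ia.1) PySem.Dict.empty

-- Literal port of A.  A's ValueError paths (a vote whose set of alternatives differs from the
-- first vote's; a non-sequence vote, impossible at this type) are excluded by Pre_ below.
def is_fishburn_domain (domain : List (List Int)) : Bool :=
  match domain with
  | [] => true
  | first :: _ =>
    let sorted_alts := PySem.List.sorted first (fun x => x)
    let m : Int := sorted_alts.length
    !(domain.any (fun vote =>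
      let pos := fishPos vote
      (PySem.List.pyRange 0 (m - 2) 1).any (fun i_idx =>
        (PySem.List.pyRange (i_idx + 1) (m - 1) 1).any (fun j_idx =>
          (PySem.List.pyRange (j_idx + 1) m 1).any (fun k_idx =>
            let i := PySem.List.pyGetD sorted_alts i_idx 0
            let j := PySem.List.pyGetD sorted_alts j_idx 0
            let k := PySem.List.pyGetD sorted_alts k_idx 0
            let pi := pos.getD i 0
            let pj := pos.getD j 0
            let pk := pos.getD k 0
            if PySem.Int.mod j 2 == 1 then
              decide (pj < pi) && decide (pj < pk)
            else
              decide (pj > pi) && decide (pj > pk))))))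

-- ===== PORT B =====
-- Literal port of Source B: per vote build p = positions of the sorted labels, then for every middle
-- index j check existence of a suitable label on each side.
def is_fishburn_domain_alt (domain : List (List Int)) : Bool :=
  match domain with
  | [] => true
  | first :: _ =>
    let sorted_alts := PySem.List.sorted first (fun x => x)
    let m : Int := sorted_alts.length
    !(domain.any (fun vote =>
      let pos := fishPos vote
      let p := sorted_alts.map (fun a => pos.getD a 0)
      (PySem.List.pyRange 1 (m - 1) 1).any (fun j =>
        let pj := PySem.List.pyGetD p j 0
        if PySem.Int.mod (PySem.List.pyGetD sorted_alts j 0) 2 == 1 then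
          ((PySem.List.pyRange 0 j 1).any (fun i => decide (PySem.List.pyGetD p i 0 > pj))) &&
          ((PySem.List.pyRange (j + 1) m 1).any (fun k => decide (PySem.List.pyGetD p k 0 > pj)))
        else
          ((PySem.List.pyRange 0 j 1).any (fun i => decide (PySem.List.pyGetD p i 0 < pj))) &&
          ((PySem.List.pyRange (j + 1) m 1).any (fun k => decide (PySem.List.pyGetD p k 0 < pj))))))

-- ===== PRECONDITION & SPEC =====
-- Pre_ excludes exactly the inputs on which A raises ValueError: a vote whose set of
-- alternatives differs from the first vote's (B raises there too).
def Pre_is_fishburn_domain (domain : List (List Int)) : Prop :=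
  ∀ v ∈ domain, (∀ x ∈ v, x ∈ domain.headD []) ∧ (∀ x ∈ domain.headD [], x ∈ v)
instance (domain : List (List Int)) : Decidable (Pre_is_fishburn_domain domain) := by
  unfold Pre_is_fishburn_domain; infer_instance

def pvWitness_is_fishburn_domain : List (List Int) := [[0, 1, 2], [2, 1, 0]]

def Spec_is_fishburn_domain (domain : List (List Int)) (out : Bool) : Prop := out = is_fishburn_domain_alt domain
instance (domain : List (List Int)) (out : Bool) : Decidable (Spec_is_fishburn_domain domain out) := by unfold Spec_is_fishburn_domain; infer_instance

-- ===== CLAIM (what is proved, stated in full; the proofs are below) =====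
def Claim_equal_is_fishburn_domain : Prop := ∀ (domain : List (List Int)), Dom_is_fishburn_domain domain → Pre_is_fishburn_domain domain → Spec_is_fishburn_domain domain (is_fishburn_domain domain)

-- ===== LEMMAS AND PROOFS =====

-- A triple (i, j, k) with i < j < k violates at its middle j iff at index j there is a witness
-- on each side: pure quantifier regrouping over the index ranges.
theorem triple_eq_middle (m : Int) (par : Int → Bool) (C D : Int → Int → Bool) :
    ((PySem.List.pyRange 0 (m - 2) 1).any (fun i =>
      (PySem.List.pyRange (i + 1) (m - 1) 1).any (fun j =>
        (PySem.List.pyRange (j + 1) m 1).any (fun k =>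
          if par j then C j i && C j k else D j i && D j k))))
  = ((PySem.List.pyRange 1 (m - 1) 1).any (fun j =>
      if par j then
        ((PySem.List.pyRange 0 j 1).any (fun i => C j i)) &&
        ((PySem.List.pyRange (j + 1) m 1).any (fun k => C j k))
      else
        ((PySem.List.pyRange 0 j 1).any (fun i => D j i)) &&
        ((PySem.List.pyRange (j + 1) m 1).any (fun k => D j k)))) := by
  apply Bool.coe_iff_coe.mp
  simp only [List.any_eq_true, PySem.List.mem_pyRange_one]
  constructor
  · rintro ⟨i, ⟨hi0, hi1⟩, j, ⟨hj0, hj1⟩, k, ⟨hk0, hk1⟩, hc⟩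
    refine ⟨j, ⟨by omega, by omega⟩, ?_⟩
    by_cases hp : par j = true
    · simp only [hp, if_true, Bool.and_eq_true, List.any_eq_true,
        PySem.List.mem_pyRange_one] at hc ⊢
      exact ⟨⟨i, ⟨by omega, by omega⟩, hc.1⟩, ⟨k, ⟨by omega, by omega⟩, hc.2⟩⟩
    · simp only [Bool.not_eq_true] at hp
      simp only [hp, Bool.false_eq_true, if_false, Bool.and_eq_true, List.any_eq_true,
        PySem.List.mem_pyRange_one] at hc ⊢
      exact ⟨⟨i, ⟨by omega, by omega⟩, hc.1⟩, ⟨k, ⟨by omega, by omega⟩, hc.2⟩⟩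
  · rintro ⟨j, ⟨hj0, hj1⟩, hc⟩
    by_cases hp : par j = true
    · simp only [hp, if_true, Bool.and_eq_true, List.any_eq_true,
        PySem.List.mem_pyRange_one] at hc
      obtain ⟨⟨i, ⟨hi0, hi1⟩, hCi⟩, ⟨k, ⟨hk0, hk1⟩, hCk⟩⟩ := hc
      exact ⟨i, ⟨by omega, by omega⟩, j, ⟨by omega, by omega⟩, k, ⟨by omega, by omega⟩,
        by simp only [hp, if_true, Bool.and_eq_true]; exact ⟨hCi, hCk⟩⟩
    · simp only [Bool.not_eq_true] at hp
      simp only [hp, Bool.false_eq_true, if_false, Bool.and_eq_true, List.any_eq_true,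
        PySem.List.mem_pyRange_one] at hc
      obtain ⟨⟨i, ⟨hi0, hi1⟩, hDi⟩, ⟨k, ⟨hk0, hk1⟩, hDk⟩⟩ := hc
      exact ⟨i, ⟨by omega, by omega⟩, j, ⟨by omega, by omega⟩, k, ⟨by omega, by omega⟩,
        by simp only [hp, Bool.false_eq_true, if_false, Bool.and_eq_true]; exact ⟨hDi, hDk⟩⟩

-- indexing the mapped position list p at an in-range index t
theorem pyGetD_map_inrange (g : Int → Int) (ls : List Int) (t : Int)
    (h0 : 0 ≤ t) (h1 : t < (ls.length : Int)) :
    PySem.List.pyGetD (ls.map g) t 0 = g (PySem.List.pyGetD ls t 0) := by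
  rw [PySem.List.pyGetD_eq_getElem _ 0 h0 (by simpa using h1),
      PySem.List.pyGetD_eq_getElem _ 0 h0 h1]
  simp

-- a one-sided scan over the mapped list p, rewritten to look up positions directly ('>' form)
theorem side_convert_gt (ls : List Int) (g : Int → Int) (lo hi x : Int)
    (h0 : 0 ≤ lo) (h1 : hi ≤ (ls.length : Int)) :
    ((PySem.List.pyRange lo hi 1).any (fun t => decide (PySem.List.pyGetD (ls.map g) t 0 > x)))
  = ((PySem.List.pyRange lo hi 1).any (fun t => decide (x < g (PySem.List.pyGetD ls t 0)))) := by
  apply PySem.List.any_congr_mem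
  intro t ht
  rw [PySem.List.mem_pyRange_one] at ht
  rw [pyGetD_map_inrange g ls t (by omega) (by omega)]

-- '<' form of the same rewrite
theorem side_convert_lt (ls : List Int) (g : Int → Int) (lo hi x : Int)
    (h0 : 0 ≤ lo) (h1 : hi ≤ (ls.length : Int)) :
    ((PySem.List.pyRange lo hi 1).any (fun t => decide (PySem.List.pyGetD (ls.map g) t 0 < x)))
  = ((PySem.List.pyRange lo hi 1).any (fun t => decide (g (PySem.List.pyGetD ls t 0) < x))) := by
  apply PySem.List.any_congr_mem
  intro t ht
  rw [PySem.List.mem_pyRange_one] at ht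
  rw [pyGetD_map_inrange g ls t (by omega) (by omega)]

-- ===== VERDICT (by name: the statement is the Claim_ definition above) =====
theorem is_fishburn_domain_spec : Claim_equal_is_fishburn_domain := by
  intro domain _ _
  unfold Spec_is_fishburn_domain
  cases domain with
  | nil => rfl
  | cons first rest =>
    simp only [is_fishburn_domain, is_fishburn_domain_alt]
    congr 1
    apply PySem.List.any_congr_mem
    intro vote _
    rw [triple_eq_middle ((PySem.List.sorted first (fun x => x)).length : Int)
      (fun j => PySem.Int.mod (PySem.List.pyGetD (PySem.List.sorted first (fun x => x)) j 0) 2 == 1)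
      (fun j t => decide ((fishPos vote).getD (PySem.List.pyGetD (PySem.List.sorted first (fun x => x)) j 0) 0 <
                          (fishPos vote).getD (PySem.List.pyGetD (PySem.List.sorted first (fun x => x)) t 0) 0))
      (fun j t => decide ((fishPos vote).getD (PySem.List.pyGetD (PySem.List.sorted first (fun x => x)) t 0) 0 <
                          (fishPos vote).getD (PySem.List.pyGetD (PySem.List.sorted first (fun x => x)) j 0) 0))]
    apply PySem.List.any_congr_mem
    intro j hj
    rw [PySem.List.mem_pyRange_one] at hj
    rw [pyGetD_map_inrange (fun a => (fishPos vote).getD a 0)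
          (PySem.List.sorted first (fun x => x)) j (by omega) (by omega),
        side_convert_gt _ _ 0 j _ le_rfl (by omega),
        side_convert_gt _ _ (j + 1) _ _ (by omega) le_rfl,
        side_convert_lt _ _ 0 j _ le_rfl (by omega),
        side_convert_lt _ _ (j + 1) _ _ (by omega) le_rfl]
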